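-- pv_equiv track=rewrite | github.com/DanClark1/MOORE | run_metaworld_sac_mt_parallel.py | split_episodes
-- ===== SOURCE A (Python) =====
-- def split_episodes(traj):
--     episodes = []
--     current = []
--     for reward, done in traj:
--         current.append(reward)
--         if done:
--             episodes.append(current)
--             current = []
--     if current:
--         episodes.append(current)
--     return episodes
-- ===== SOURCE B (Python) =====
-- def split_episodes(traj):
--     traj = list(traj)
--     rewards = [r for r, d in traj]
--     cuts = [i + 1 for i, (r, d) in enumerate(traj) if d]
--     episodes = []
--     start = 0
--     for c in cuts:
--         episodes.append(rewards[start:c])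
--         start = c
--     if start < len(rewards):
--         episodes.append(rewards[start:])
--     return episodes
-- ===== Notes on version B (the rewrite author's own statement) =====
-- stated objective: alternative
-- what changed: Replaces A's single accumulate-and-flush loop (growing a current list and flushing it on done) by two passes: build the rewards list and a table of cut indices from the done flags, then reconstruct the episodes by slicing rewards between consecutive cut points, appending the tail slice only if it is nonempty.
import Mathlib
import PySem

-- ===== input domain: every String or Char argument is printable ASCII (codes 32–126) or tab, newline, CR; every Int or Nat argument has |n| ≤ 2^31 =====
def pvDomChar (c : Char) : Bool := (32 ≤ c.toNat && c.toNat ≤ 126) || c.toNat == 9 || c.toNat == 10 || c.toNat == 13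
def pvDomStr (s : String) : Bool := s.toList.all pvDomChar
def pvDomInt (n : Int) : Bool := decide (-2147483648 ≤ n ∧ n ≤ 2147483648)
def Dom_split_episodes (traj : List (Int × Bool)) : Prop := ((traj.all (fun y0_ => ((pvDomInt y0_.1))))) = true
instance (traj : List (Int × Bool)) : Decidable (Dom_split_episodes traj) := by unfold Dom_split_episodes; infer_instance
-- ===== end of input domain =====

-- B replaces A's incremental accumulate-and-flush loop by a cut-index table plus a
-- slicing pass (objective: alternative decomposition, same cost).

-- ===== PORT A =====
-- literal transliteration of A's loop: state = (episodes, current)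
def split_episodes (traj : List (Int × Bool)) : List (List Int) :=
  let st := traj.foldl
    (fun (s : List (List Int) × List Int) (p : Int × Bool) =>
      let cur := s.2 ++ [p.1]
      if p.2 then (s.1 ++ [cur], ([] : List Int)) else (s.1, cur))
    ([], [])
  if st.2.isEmpty then st.1 else st.1 ++ [st.2]

-- ===== PORT B =====
-- literal transliteration of Source B: rewards list, cut-index table, then a slicing pass
def split_episodes_alt (traj : List (Int × Bool)) : List (List Int) :=
  let rewards := traj.map (fun p => p.1)
  let cuts := (PySem.List.enumerate traj 0).filterMap
    (fun q => if q.2.2 then some (q.1 + 1) else none)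
  let st := cuts.foldl
    (fun (s : List (List Int) × Int) (c : Int) =>
      (s.1 ++ [PySem.List.slice rewards (some s.2) (some c)], c))
    ([], 0)
  if st.2 < (rewards.length : Int) then
    st.1 ++ [PySem.List.slice rewards (some st.2) none]
  else st.1

-- ===== PRECONDITION & SPEC =====
def Spec_split_episodes (traj : List (Int × Bool)) (out : List (List Int)) : Prop := out = split_episodes_alt traj
instance (traj : List (Int × Bool)) (out : List (List Int)) : Decidable (Spec_split_episodes traj out) := by unfold Spec_split_episodes; infer_instance

-- ===== CLAIM (what is proved, stated in full; the proofs are below) =====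
def Claim_equal_split_episodes : Prop := ∀ (traj : List (Int × Bool)), Dom_split_episodes traj → Spec_split_episodes traj (split_episodes traj)

-- ===== LEMMAS AND PROOFS =====

-- reference recursion: the episodes of t given the currently open episode cur
def pvAux : List Int → List (Int × Bool) → List (List Int)
  | cur, [] => if cur = [] then [] else [cur]
  | cur, (r, d) :: t => if d then (cur ++ [r]) :: pvAux [] t else pvAux (cur ++ [r]) t

theorem pvA_fold (t : List (Int × Bool)) :
    ∀ (eps : List (List Int)) (cur : List Int),
    (let st := t.foldl
        (fun (s : List (List Int) × List Int) (p : Int × Bool) =>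
          let c := s.2 ++ [p.1]
          if p.2 then (s.1 ++ [c], ([] : List Int)) else (s.1, c))
        (eps, cur)
     if st.2.isEmpty then st.1 else st.1 ++ [st.2]) = eps ++ pvAux cur t := by
  induction t with
  | nil =>
    intro eps cur
    cases cur <;> simp [pvAux]
  | cons p t ih =>
    intro eps cur
    obtain ⟨r, d⟩ := p
    cases d
    · simpa [pvAux] using ih eps (cur ++ [r])
    · simpa [pvAux] using ih (eps ++ [cur ++ [r]]) []

theorem pv_take_succ_of_drop {R : List Int} {r : Int} {l : List Int} {start k : Nat}
    (hle : start ≤ k) (hd : R.drop k = r :: l) :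
    (R.drop start).take (k + 1 - start) = (R.drop start).take (k - start) ++ [r] := by
  have hget : R[k]? = some r := by
    have h0 : (R.drop k)[0]? = some r := by rw [hd]; rfl
    rwa [List.getElem?_drop, Nat.add_zero] at h0
  have h2 : (R.drop start)[k - start]? = some r := by
    rw [List.getElem?_drop]
    have : start + (k - start) = k := by omega
    rw [this, hget]
  have : k + 1 - start = (k - start) + 1 := by omega
  rw [this, List.take_add_one, h2]
  simp

theorem pvB_fold (t : List (Int × Bool)) :
    ∀ (k start : Nat) (R : List Int) (acc : List (List Int)),
    start ≤ k → R.drop k = t.map (fun p => p.1) →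
    (let st := ((PySem.List.enumerate t (k : Int)).filterMap
        (fun q => if q.2.2 then some (q.1 + 1) else none)).foldl
        (fun (s : List (List Int) × Int) (c : Int) =>
          (s.1 ++ [PySem.List.slice R (some s.2) (some c)], c))
        (acc, (start : Int))
     if st.2 < (R.length : Int) then
       st.1 ++ [PySem.List.slice R (some st.2) none]
     else st.1) = acc ++ pvAux ((R.drop start).take (k - start)) t := by
  induction t with
  | nil =>
    intro k start R acc hle hdrop
    have hlen : R.length ≤ k := by
      have := congrArg List.length hdrop
      simp at this; omega
    have htake : (R.drop start).take (k - start) = R.drop start := by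
      apply List.take_of_length_le
      simp; omega
    simp only [PySem.List.enumerate_nil, List.filterMap_nil, List.foldl_nil]
    rw [PySem.List.slice_from_natCast]
    by_cases h : start < R.length
    · have hne : R.drop start ≠ [] := by
        simp [List.drop_eq_nil_iff]; omega
      simp [h, htake, pvAux, hne]
    · have hnil : R.drop start = [] := by
        rw [List.drop_eq_nil_iff]; omega
      have : ¬ ((start : Int) < (R.length : Int)) := by exact_mod_cast h
      simp [this, hnil, pvAux]
  | cons p t ih =>
    intro k start R acc hle hdrop
    obtain ⟨r, d⟩ := p
    simp only [List.map_cons] at hdrop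
    have hdrop' : R.drop (k + 1) = t.map (fun p => p.1) := by
      have := congrArg (List.drop 1) hdrop
      simpa [List.drop_drop, Nat.add_comm] using this
    have hcast : (k : Int) + 1 = ((k + 1 : Nat) : Int) := by push_cast; ring
    have hcur : (R.drop start).take (k + 1 - start) = (R.drop start).take (k - start) ++ [r] :=
      pv_take_succ_of_drop hle hdrop
    cases d
    · -- done = false: no cut here
      have hfm : (PySem.List.enumerate ((r, false) :: t) (k : Int)).filterMap
            (fun q => if q.2.2 then some (q.1 + 1) else none)
          = (PySem.List.enumerate t ((k : Int) + 1)).filterMap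
            (fun q => if q.2.2 then some (q.1 + 1) else none) := by
        simp [PySem.List.enumerate_cons]
      rw [hcast] at hfm
      simp only [hfm, ih (k + 1) start R acc (by omega) hdrop']
      simp [pvAux, hcur]
    · -- done = true: cut at k+1
      have hfm : (PySem.List.enumerate ((r, true) :: t) (k : Int)).filterMap
            (fun q => if q.2.2 then some (q.1 + 1) else none)
          = ((k : Int) + 1) :: (PySem.List.enumerate t ((k : Int) + 1)).filterMap
            (fun q => if q.2.2 then some (q.1 + 1) else none) := by
        simp [PySem.List.enumerate_cons]
      rw [hcast] at hfm
      have hslice : PySem.List.slice R (some ((start : Nat) : Int)) (some ((k + 1 : Nat) : Int))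
          = (R.drop start).take (k - start) ++ [r] := by
        rw [PySem.List.slice_natCast, hcur]
      simp only [hfm, List.foldl_cons, hslice,
        ih (k + 1) (k + 1) R (acc ++ [(R.drop start).take (k - start) ++ [r]]) le_rfl hdrop']
      simp [pvAux]

-- ===== VERDICT (by name: the statement is the Claim_ definition above) =====
theorem split_episodes_spec : Claim_equal_split_episodes := by
  intro traj _
  show split_episodes traj = split_episodes_alt traj
  have hA := pvA_fold traj [] []
  have hB := pvB_fold traj 0 0 (traj.map (fun p => p.1)) [] le_rfl (by simp)
  simp only at hA hB
  unfold split_episodes split_episodes_alt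
  simp only [List.nil_append, List.drop_zero, Nat.cast_zero] at hA hB
  exact hA.trans (by simpa using hB.symm)
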